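-- pv_equiv track=rewrite | github.com/youyouhe/docmind-ai | pageindex_v2/phases/tree_audit_advisor.py | _summarize_advice
-- ===== SOURCE A (Python) =====
-- from typing import Dict, List, Any, Optional
--
-- def _summarize_advice(advice_list: List[Dict], total_nodes: int) -> Dict:
--     """汇总建议统计"""
--     summary = {
--         "total_nodes": total_nodes,
--         "to_delete": 0,
--         "to_modify_format": 0,
--         "to_modify_page": 0,
--         "to_add": 0,
--         "high_confidence": 0,
--         "medium_confidence": 0,
--         "low_confidence": 0
--     }
--
--     for advice in advice_list:
--         action = advice.get("action", "").upper()
--         confidence = advice.get("confidence", "low")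
--
--         if action == "DELETE":
--             summary["to_delete"] += 1
--         elif action == "MODIFY_FORMAT":
--             summary["to_modify_format"] += 1
--         elif action == "MODIFY_PAGE":
--             summary["to_modify_page"] += 1
--         elif action == "ADD":
--             summary["to_add"] += 1
--
--         if confidence == "high":
--             summary["high_confidence"] += 1
--         elif confidence == "medium":
--             summary["medium_confidence"] += 1
--         else:
--             summary["low_confidence"] += 1
--
--     summary["to_keep"] = total_nodes - summary["to_delete"]
--
--     return summary
-- ===== SOURCE B (Python) =====
-- from typing import Dict, List, Any, Optional
--
-- def _summarize_advice(advice_list: List[Dict], total_nodes: int) -> Dict: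
--     """Summarize advice statistics by counting extracted keys (build-table-then-project)."""
--     actions = [advice.get("action", "").upper() for advice in advice_list]
--     confidences = [advice.get("confidence", "low") for advice in advice_list]
--     to_delete = actions.count("DELETE")
--     high = confidences.count("high")
--     medium = confidences.count("medium")
--     return {
--         "total_nodes": total_nodes,
--         "to_delete": to_delete,
--         "to_modify_format": actions.count("MODIFY_FORMAT"),
--         "to_modify_page": actions.count("MODIFY_PAGE"),
--         "to_add": actions.count("ADD"),
--         "high_confidence": high,
--         "medium_confidence": medium,
--         "low_confidence": len(advice_list) - high - medium,
--         "to_keep": total_nodes - to_delete,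
--     }
-- ===== Notes on version B (the rewrite author's own statement) =====
-- stated objective: idiomatic
-- what changed: Replaces the per-item if/elif counter-increment loop over a mutable summary dict with extracting the action/confidence key lists once and projecting each summary field with list.count, deriving low_confidence as len - high - medium and to_keep as total_nodes - to_delete.
import Mathlib
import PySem

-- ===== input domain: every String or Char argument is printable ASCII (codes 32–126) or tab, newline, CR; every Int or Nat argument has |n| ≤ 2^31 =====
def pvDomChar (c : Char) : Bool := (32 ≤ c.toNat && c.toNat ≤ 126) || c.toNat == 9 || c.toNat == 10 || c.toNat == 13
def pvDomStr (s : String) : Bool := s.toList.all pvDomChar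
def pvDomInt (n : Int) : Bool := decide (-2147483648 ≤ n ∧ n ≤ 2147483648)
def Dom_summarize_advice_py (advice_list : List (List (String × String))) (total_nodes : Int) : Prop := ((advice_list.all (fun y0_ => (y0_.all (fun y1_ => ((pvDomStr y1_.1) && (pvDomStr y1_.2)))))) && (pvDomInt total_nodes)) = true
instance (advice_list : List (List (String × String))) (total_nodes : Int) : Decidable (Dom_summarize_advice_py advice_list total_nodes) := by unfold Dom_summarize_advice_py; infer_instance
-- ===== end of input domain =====

-- B is an idiomatic build-table-then-project rewrite; return-value equivalence only (A mutates no argument).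

-- ===== PORT A =====
-- helper shared by both ports: advice.get("action", "").upper()  /  advice.get("confidence", "low")
def pvAction (advice : List (String × String)) : String :=
  PySem.Str.upper ((PySem.Dict.mk advice).getD "action" "")

def pvConfidence (advice : List (String × String)) : String :=
  (PySem.Dict.mk advice).getD "confidence" "low"

def summarize_advice_py (advice_list : List (List (String × String))) (total_nodes : Int) : List (String × Int) :=
  let summary : PySem.Dict String Int := PySem.Dict.mk
    [("total_nodes", total_nodes), ("to_delete", 0), ("to_modify_format", 0),
     ("to_modify_page", 0), ("to_add", 0), ("high_confidence", 0),
     ("medium_confidence", 0), ("low_confidence", 0)]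
  let summary := advice_list.foldl (fun summary advice =>
    let action := pvAction advice
    let confidence := pvConfidence advice
    let summary :=
      if action == "DELETE" then summary.insert "to_delete" (summary.getD "to_delete" 0 + 1)
      else if action == "MODIFY_FORMAT" then summary.insert "to_modify_format" (summary.getD "to_modify_format" 0 + 1)
      else if action == "MODIFY_PAGE" then summary.insert "to_modify_page" (summary.getD "to_modify_page" 0 + 1)
      else if action == "ADD" then summary.insert "to_add" (summary.getD "to_add" 0 + 1)
      else summary
    if confidence == "high" then summary.insert "high_confidence" (summary.getD "high_confidence" 0 + 1)
    else if confidence == "medium" then summary.insert "medium_confidence" (summary.getD "medium_confidence" 0 + 1)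
    else summary.insert "low_confidence" (summary.getD "low_confidence" 0 + 1)) summary
  let summary := summary.insert "to_keep" (total_nodes - summary.getD "to_delete" 0)
  summary.items

-- ===== PORT B =====
def summarize_advice_py_alt (advice_list : List (List (String × String))) (total_nodes : Int) : List (String × Int) :=
  let actions := advice_list.map pvAction
  let confidences := advice_list.map pvConfidence
  let to_delete : Int := actions.count "DELETE"
  let high : Int := confidences.count "high"
  let medium : Int := confidences.count "medium"
  [("total_nodes", total_nodes),
   ("to_delete", to_delete),
   ("to_modify_format", (actions.count "MODIFY_FORMAT" : Int)),
   ("to_modify_page", (actions.count "MODIFY_PAGE" : Int)),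
   ("to_add", (actions.count "ADD" : Int)),
   ("high_confidence", high),
   ("medium_confidence", medium),
   ("low_confidence", (advice_list.length : Int) - high - medium),
   ("to_keep", total_nodes - to_delete)]

-- ===== PRECONDITION & SPEC =====
def Spec_summarize_advice_py (advice_list : List (List (String × String))) (total_nodes : Int) (out : List (String × Int)) : Prop := out = summarize_advice_py_alt advice_list total_nodes
instance (advice_list : List (List (String × String))) (total_nodes : Int) (out : List (String × Int)) : Decidable (Spec_summarize_advice_py advice_list total_nodes out) := by unfold Spec_summarize_advice_py; infer_instance

-- ===== CLAIM (what is proved, stated in full; the proofs are below) =====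
def Claim_equal_summarize_advice_py : Prop := ∀ (advice_list : List (List (String × String))) (total_nodes : Int), Dom_summarize_advice_py advice_list total_nodes → Spec_summarize_advice_py advice_list total_nodes (summarize_advice_py advice_list total_nodes)

-- ===== LEMMAS AND PROOFS =====

-- the symbolic shape of A's summary dict during the loop
def pvS (n d f p a h m lo : Int) : PySem.Dict String Int := PySem.Dict.mk
  [("total_nodes", n), ("to_delete", d), ("to_modify_format", f),
   ("to_modify_page", p), ("to_add", a), ("high_confidence", h),
   ("medium_confidence", m), ("low_confidence", lo)]

theorem pvS_step (x : List (String × String)) (n d f p a h m lo : Int) :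
    (let action := pvAction x
     let confidence := pvConfidence x
     let summary :=
       if action == "DELETE" then (pvS n d f p a h m lo).insert "to_delete" ((pvS n d f p a h m lo).getD "to_delete" 0 + 1)
       else if action == "MODIFY_FORMAT" then (pvS n d f p a h m lo).insert "to_modify_format" ((pvS n d f p a h m lo).getD "to_modify_format" 0 + 1)
       else if action == "MODIFY_PAGE" then (pvS n d f p a h m lo).insert "to_modify_page" ((pvS n d f p a h m lo).getD "to_modify_page" 0 + 1)
       else if action == "ADD" then (pvS n d f p a h m lo).insert "to_add" ((pvS n d f p a h m lo).getD "to_add" 0 + 1)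
       else pvS n d f p a h m lo
     if confidence == "high" then summary.insert "high_confidence" (summary.getD "high_confidence" 0 + 1)
     else if confidence == "medium" then summary.insert "medium_confidence" (summary.getD "medium_confidence" 0 + 1)
     else summary.insert "low_confidence" (summary.getD "low_confidence" 0 + 1)) =
    pvS n (d + if pvAction x == "DELETE" then 1 else 0)
          (f + if pvAction x == "DELETE" then 0 else if pvAction x == "MODIFY_FORMAT" then 1 else 0)
          (p + if pvAction x == "DELETE" ∨ pvAction x == "MODIFY_FORMAT" then 0 else if pvAction x == "MODIFY_PAGE" then 1 else 0)
          (a + if pvAction x == "DELETE" ∨ pvAction x == "MODIFY_FORMAT" ∨ pvAction x == "MODIFY_PAGE" then 0 else if pvAction x == "ADD" then 1 else 0)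
          (h + if pvConfidence x == "high" then 1 else 0)
          (m + if pvConfidence x == "high" then 0 else if pvConfidence x == "medium" then 1 else 0)
          (lo + if pvConfidence x == "high" ∨ pvConfidence x == "medium" then 0 else 1) := by
  simp only [pvS]
  split_ifs <;>
    simp_all [PySem.Dict.insert, PySem.Dict.contains, PySem.Dict.getD, PySem.Dict.get?]

theorem pvS_foldl (l : List (List (String × String))) (n d f p a h m lo : Int) :
    l.foldl (fun summary advice =>
      let action := pvAction advice
      let confidence := pvConfidence advice
      let summary :=
        if action == "DELETE" then summary.insert "to_delete" (summary.getD "to_delete" 0 + 1)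
        else if action == "MODIFY_FORMAT" then summary.insert "to_modify_format" (summary.getD "to_modify_format" 0 + 1)
        else if action == "MODIFY_PAGE" then summary.insert "to_modify_page" (summary.getD "to_modify_page" 0 + 1)
        else if action == "ADD" then summary.insert "to_add" (summary.getD "to_add" 0 + 1)
        else summary
      if confidence == "high" then summary.insert "high_confidence" (summary.getD "high_confidence" 0 + 1)
      else if confidence == "medium" then summary.insert "medium_confidence" (summary.getD "medium_confidence" 0 + 1)
      else summary.insert "low_confidence" (summary.getD "low_confidence" 0 + 1)) (pvS n d f p a h m lo)
    = pvS n (d + ((l.map pvAction).count "DELETE" : Int))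
            (f + ((l.map pvAction).count "MODIFY_FORMAT" : Int))
            (p + ((l.map pvAction).count "MODIFY_PAGE" : Int))
            (a + ((l.map pvAction).count "ADD" : Int))
            (h + ((l.map pvConfidence).count "high" : Int))
            (m + ((l.map pvConfidence).count "medium" : Int))
            (lo + ((l.length : Int) - (l.map pvConfidence).count "high" - (l.map pvConfidence).count "medium")) := by
  induction l generalizing d f p a h m lo with
  | nil => simp
  | cons x t ih =>
    simp only [List.foldl_cons]
    rw [pvS_step, ih]
    clear ih
    simp only [pvS, PySem.Dict.mk.injEq, List.cons.injEq, Prod.mk.injEq, List.map_cons,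
      List.count_cons, List.length_cons, beq_iff_eq]
    and_intros <;> first
      | trivial
      | (split_ifs <;> first
          | (push_cast; omega)
          | tauto
          | (exfalso; simp_all))

-- ===== VERDICT (by name: the statement is the Claim_ definition above) =====
theorem summarize_advice_py_spec : Claim_equal_summarize_advice_py := by
  intro l n _
  unfold Spec_summarize_advice_py summarize_advice_py summarize_advice_py_alt
  simp only []
  rw [show (PySem.Dict.mk
    [("total_nodes", n), ("to_delete", (0:Int)), ("to_modify_format", 0),
     ("to_modify_page", 0), ("to_add", 0), ("high_confidence", 0),
     ("medium_confidence", 0), ("low_confidence", 0)]) = pvS n 0 0 0 0 0 0 0 from rfl,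
     pvS_foldl l n 0 0 0 0 0 0 0]
  simp [pvS, PySem.Dict.insert, PySem.Dict.contains, PySem.Dict.getD, PySem.Dict.get?]
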